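-- pv_equiv track=rewrite | github.com/mani7lall/divine-seo-content-tool | seoworkbench/internal_linking.py | suggest_internal_links
-- ===== SOURCE A (Python) =====
-- from collections import defaultdict
-- from typing import Dict, Iterable, List, Tuple
--
-- def suggest_internal_links(pages: Dict[str, Iterable[str]], top_k: int = 5) -> Dict[str, List[Tuple[str, int]]]:
--     # pages: {page_id: [keywords...]}
--     idx = {pid: set(kw.lower().strip() for kw in kws if kw) for pid, kws in pages.items()}
--     out: Dict[str, List[Tuple[str, int]]] = defaultdict(list)
--     for a, kwa in idx.items():
--         scores = []
--         for b, kwb in idx.items():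
--             if a == b:
--                 continue
--             overlap = len(kwa & kwb)
--             if overlap > 0:
--                 scores.append((b, overlap))
--         scores.sort(key=lambda x: x[1], reverse=True)
--         out[a] = scores[:top_k]
--     return out
-- ===== SOURCE B (Python) =====
-- from collections import Counter, defaultdict
--
--
-- def suggest_internal_links(pages, top_k=5):
--     # pages: {page_id: [keywords...]}
--     idx = {pid: set(kw.lower().strip() for kw in kws if kw) for pid, kws in pages.items()}
--     pos = {pid: i for i, pid in enumerate(idx)}
--     postings = defaultdict(list)
--     for pid, kws in idx.items():
--         for kw in kws:
--             postings[kw].append(pid)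
--     out = {}
--     for a, kwa in idx.items():
--         cnt = Counter(b for kw in kwa for b in postings[kw] if b != a)
--         ranked = sorted(cnt.items(), key=lambda it: (-it[1], pos[it[0]]))
--         out[a] = ranked[:top_k]
--     return out
-- ===== Notes on version B (the rewrite author's own statement) =====
-- stated objective: faster
-- what changed: Replaces A's all-pairs per-page set intersections with an inverted keyword->pages index and a Counter over posting lists, then one sort per page keyed by (-score, page position) instead of a stable reverse sort of an all-pages scan.
import Mathlib
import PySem

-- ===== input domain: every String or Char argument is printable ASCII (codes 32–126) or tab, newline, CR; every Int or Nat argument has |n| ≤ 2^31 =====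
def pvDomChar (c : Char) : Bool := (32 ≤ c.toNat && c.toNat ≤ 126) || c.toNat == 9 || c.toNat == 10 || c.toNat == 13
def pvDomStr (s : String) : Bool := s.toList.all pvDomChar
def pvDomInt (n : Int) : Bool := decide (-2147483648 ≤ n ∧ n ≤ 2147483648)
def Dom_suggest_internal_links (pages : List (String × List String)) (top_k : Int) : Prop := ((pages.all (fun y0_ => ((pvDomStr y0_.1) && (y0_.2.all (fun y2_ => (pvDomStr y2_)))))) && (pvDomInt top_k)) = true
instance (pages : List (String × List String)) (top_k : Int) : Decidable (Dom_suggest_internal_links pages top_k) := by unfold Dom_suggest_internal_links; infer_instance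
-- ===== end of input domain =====

-- B replaces A's all-pairs set intersections by an inverted keyword→pages index: per page it
-- counts only actually co-occurring pages (Counter over posting lists) and sorts once by
-- (-score, page position), which reproduces A's stable score-descending order exactly.

-- ===== PORT A =====
def suggest_internal_links (pages : List (String × List String)) (top_k : Int) : List (String × List (String × Int)) :=
  -- idx = {pid: set(kw.lower().strip() for kw in kws if kw) for pid, kws in pages.items()}
  let idx : PySem.Dict String (PySem.Set String) :=
    (PySem.Dict.ofList pages).items.foldl
      (fun d p => d.insert p.1
        (PySem.Set.ofList ((p.2.filter (fun kw => kw ≠ "")).map (fun kw => PySem.Str.strip (PySem.Str.lower kw)))))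
      PySem.Dict.empty
  -- for a, kwa in idx.items(): … out[a] = scores[:top_k]
  let out : PySem.Dict String (List (String × Int)) :=
    idx.items.foldl (fun out a =>
      let scores : List (String × Int) :=
        idx.items.foldl (fun scores b =>
          if a.1 == b.1 then scores
          else
            let overlap : Int := PySem.Set.len (PySem.Set.inter a.2 b.2)
            if overlap > 0 then scores ++ [(b.1, overlap)] else scores) []
      let scores := PySem.List.sorted scores (fun x => x.2) true
      out.insert a.1 (PySem.List.slice scores none (some top_k))) PySem.Dict.empty
  out.items

-- ===== PORT B =====
def suggest_internal_links_alt (pages : List (String × List String)) (top_k : Int) : List (String × List (String × Int)) :=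
  -- idx = {pid: set(kw.lower().strip() for kw in kws if kw) for pid, kws in pages.items()}  (unique keys: kept as its items list)
  let idx : List (String × PySem.Set String) :=
    (PySem.Dict.ofList pages).items.map
      (fun p => (p.1, PySem.Set.ofList ((p.2.filter (fun kw => kw ≠ "")).map (fun kw => PySem.Str.strip (PySem.Str.lower kw)))))
  -- pos = {pid: i for i, pid in enumerate(idx)}
  let pos : PySem.Dict String Int :=
    (PySem.List.enumerate (idx.map (fun p => p.1)) 0).foldl (fun d p => d.insert p.2 p.1) PySem.Dict.empty
  -- for pid, kws in idx.items(): for kw in kws: postings[kw].append(pid)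
  let postings : PySem.Dict String (List String) :=
    idx.foldl (fun d p => p.2.foldl (fun d kw => d.modify kw [] (fun l => l ++ [p.1])) d) PySem.Dict.empty
  -- for a, kwa in idx.items(): cnt = Counter(b for kw in kwa for b in postings[kw] if b != a); …
  let out : PySem.Dict String (List (String × Int)) :=
    idx.foldl (fun out a =>
      let cnt : PySem.Dict String Int :=
        PySem.Dict.counter (a.2.flatMap (fun kw => (postings.getD kw []).filter (fun b => b ≠ a.1)))
      let ranked := PySem.List.sorted2 cnt.items (fun it => -it.2) (fun it => pos.getD it.1 0) false
      out.insert a.1 (PySem.List.slice ranked none (some top_k))) PySem.Dict.empty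
  out.items

-- ===== PRECONDITION & SPEC =====
def Spec_suggest_internal_links (pages : List (String × List String)) (top_k : Int) (out : List (String × List (String × Int))) : Prop := out = suggest_internal_links_alt pages top_k
instance (pages : List (String × List String)) (top_k : Int) (out : List (String × List (String × Int))) : Decidable (Spec_suggest_internal_links pages top_k out) := by unfold Spec_suggest_internal_links; infer_instance

-- ===== CLAIM (what is proved, stated in full; the proofs are below) =====
def Claim_equal_suggest_internal_links : Prop := ∀ (pages : List (String × List String)) (top_k : Int), Dom_suggest_internal_links pages top_k → Spec_suggest_internal_links pages top_k (suggest_internal_links pages top_k)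

-- ===== LEMMAS AND PROOFS =====


-- helper names for the shared shapes of the two ports (proof-side only)
def pvKwset (kws : List String) : PySem.Set String :=
  PySem.Set.ofList ((kws.filter (fun kw => kw ≠ "")).map (fun kw => PySem.Str.strip (PySem.Str.lower kw)))

def pvIdx (pages : List (String × List String)) : List (String × PySem.Set String) :=
  (PySem.Dict.ofList pages).items.map (fun p => (p.1, pvKwset p.2))

def pvOv (a b : String × PySem.Set String) : Int := PySem.Set.len (PySem.Set.inter a.2 b.2)

def pvPos (L : List (String × PySem.Set String)) : PySem.Dict String Int :=
  (PySem.List.enumerate (L.map (fun p => p.1)) 0).foldl (fun d p => d.insert p.2 p.1) PySem.Dict.empty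

def pvPost (L : List (String × PySem.Set String)) : PySem.Dict String (List String) :=
  L.foldl (fun d p => p.2.foldl (fun d kw => d.modify kw [] (fun l => l ++ [p.1])) d) PySem.Dict.empty

def pvHits (L : List (String × PySem.Set String)) (a : String × PySem.Set String) : List String :=
  a.2.flatMap (fun kw => ((pvPost L).getD kw []).filter (fun b => b ≠ a.1))

def pvScores (L : List (String × PySem.Set String)) (a : String × PySem.Set String) : List (String × Int) :=
  L.foldl (fun scores b =>
    if a.1 == b.1 then scores
    else if PySem.Set.len (PySem.Set.inter a.2 b.2) > 0 then scores ++ [(b.1, PySem.Set.len (PySem.Set.inter a.2 b.2))] else scores) []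

-- the strict order that both per-page rankings realise: higher score first, ties by page position
def pvR (posOf : String → Int) (x y : String × Int) : Prop :=
  y.2 < x.2 ∨ (x.2 = y.2 ∧ posOf x.1 < posOf y.1)

lemma pv_foldl_flatMap {α β γ : Type} (g : α → List β) (f : γ → β → γ) (l : List α) (init : γ) :
    (l.flatMap g).foldl f init = l.foldl (fun acc x => (g x).foldl f acc) init := by
  induction l generalizing init with
  | nil => rfl
  | cons x l ih => simp [List.flatMap_cons, List.foldl_append, ih]

lemma pv_scores_eq (L : List (String × PySem.Set String)) (a : String × PySem.Set String) :
    pvScores L a = (L.filter (fun b => !(a.1 == b.1) && decide (0 < pvOv a b))).map (fun b => (b.1, pvOv a b)) := by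
  unfold pvScores
  have hstep : (fun (scores : List (String × Int)) (b : String × PySem.Set String) =>
      if a.1 == b.1 then scores
      else if PySem.Set.len (PySem.Set.inter a.2 b.2) > 0 then scores ++ [(b.1, PySem.Set.len (PySem.Set.inter a.2 b.2))] else scores)
      = (fun scores b => if (!(a.1 == b.1) && decide (0 < pvOv a b)) then scores ++ [(b.1, pvOv a b)] else scores) := by
    funext scores b
    by_cases h1 : a.1 == b.1 <;> by_cases h2 : 0 < pvOv a b <;>
      simp [h1, pvOv]
  rw [hstep, PySem.List.foldl_append_if]
  simp

lemma pv_post_getD (L : List (String × PySem.Set String)) (kw : String) :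
    (pvPost L).getD kw [] =
      ((L.flatMap (fun p => p.2.map (fun k' => (k', p.1)))).filter (fun q => q.1 == kw)).map (fun q => q.2) := by
  unfold pvPost
  have h1 : (fun (d : PySem.Dict String (List String)) (p : String × PySem.Set String) =>
        p.2.foldl (fun d kw => d.modify kw [] (fun l => l ++ [p.1])) d)
      = (fun d p => ((p.2.map (fun k' => (k', p.1))).foldl (fun d (q : String × String) => d.modify q.1 [] (fun l => l ++ [q.2])) d)) := by
    funext d p
    rw [List.foldl_map]
  rw [h1, ← pv_foldl_flatMap]
  rw [PySem.Dict.getD_foldl_modify_append]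
  simp

lemma pv_key_inj {L : List (String × PySem.Set String)} (hk : (L.map (fun p => p.1)).Nodup)
    {b c : String × PySem.Set String} (hb : b ∈ L) (hc : c ∈ L) (h : b.1 = c.1) : b = c :=
  List.inj_on_of_nodup_map hk hb hc h

lemma pv_sum_single {α : Type} {p : String × PySem.Set String} {L : List (String × PySem.Set String)}
    [AddCommMonoid α] (g : String × PySem.Set String → α)
    (hk : (L.map (fun r => r.1)).Nodup) (hp : p ∈ L) :
    (L.map (fun r => if r.1 = p.1 then g r else 0)).sum = g p := by
  induction L with
  | nil => cases hp
  | cons r L ih =>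
    simp only [List.map_cons, List.nodup_cons, List.mem_map] at hk
    rcases List.mem_cons.mp hp with rfl | hpL
    · have hz : (L.map (fun r' => if r'.1 = p.1 then g r' else 0)).sum = 0 := by
        apply List.sum_eq_zero
        intro x hx
        rcases List.mem_map.mp hx with ⟨r', hr', rfl⟩
        have : r'.1 ≠ p.1 := fun he => hk.1 ⟨r', hr', he⟩
        simp [this]
      simp [hz]
    · have hne : r.1 ≠ p.1 := by
        intro he
        exact hk.1 ⟨p, hpL, he.symm⟩
      simp only [List.map_cons, List.sum_cons, if_neg hne, zero_add]
      exact ih hk.2 hpL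

lemma pv_sum_ite_one (l : List String) (q : String → Bool) :
    (l.map (fun x => if q x then (1 : Nat) else 0)).sum = l.countP q := by
  induction l with
  | nil => rfl
  | cons x l ih => by_cases h : q x <;> simp [h, ih]; omega

lemma pv_count_hits (L : List (String × PySem.Set String)) (hk : (L.map (fun r => r.1)).Nodup)
    (a p : String × PySem.Set String) (hp : p ∈ L) (hps : (p.2 : List String).Nodup) (hne : p.1 ≠ a.1) :
    (pvHits L a).count p.1 = (PySem.Set.inter a.2 p.2).length := by
  unfold pvHits
  rw [List.count_flatMap]
  have hkw : ∀ kw : String, List.count p.1 (((pvPost L).getD kw []).filter (fun b => b ≠ a.1))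
      = (if kw ∈ (p.2 : List String) then 1 else 0) := by
    intro kw
    rw [List.count_filter (by simp [hne])]
    rw [pv_post_getD]
    rw [List.count_eq_countP, List.countP_map, List.countP_filter]
    have hpred : (((fun x => x == p.1) ∘ fun (q : String × String) => q.2)) = (fun (q : String × String) => q.2 == p.1) := rfl
    rw [List.countP_flatMap]
    have hterm : ∀ r ∈ L, (List.countP (fun q => ((fun x => x == p.1) ∘ fun (q : String × String) => q.2) q && (q.1 == kw)) ∘
        (fun r : String × PySem.Set String => r.2.map (fun k' => (k', r.1)))) r
        = (if r.1 = p.1 then List.count kw (r.2 : List String) else 0) := by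
      intro r _
      show List.countP _ (r.2.map (fun k' => (k', r.1))) = _
      rw [List.countP_map]
      by_cases h : r.1 = p.1
      · rw [if_pos h, List.count_eq_countP]
        apply List.countP_congr
        intro k' _
        simp [h]
      · rw [if_neg h]
        rw [List.countP_eq_zero]
        intro k' _
        simp [h]
    rw [List.map_congr_left hterm]
    rw [pv_sum_single (fun r => List.count kw (r.2 : List String)) hk hp]
    by_cases h : kw ∈ (p.2 : List String)
    · rw [if_pos h]
      exact List.count_eq_one_of_mem hps h
    · rw [if_neg h]
      exact List.count_eq_zero.mpr h
  have : (List.map (List.count p.1 ∘ fun kw => ((pvPost L).getD kw []).filter (fun b => b ≠ a.1)) (a.2 : List String))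
      = (a.2 : List String).map (fun kw => if kw ∈ (p.2 : List String) then (1:Nat) else 0) := by
    apply List.map_congr_left
    intro kw _
    exact hkw kw
  rw [this]
  have h2 : (a.2 : List String).map (fun kw => if kw ∈ (p.2 : List String) then (1:Nat) else 0)
      = (a.2 : List String).map (fun kw => if (fun kw => (p.2 : PySem.Set String).contains kw) kw then (1:Nat) else 0) := by
    apply List.map_congr_left; intro kw _
    by_cases h : kw ∈ (p.2 : List String) <;> simp [h]
  rw [h2, pv_sum_ite_one]
  show _ = (List.filter (fun x => (p.2 : PySem.Set String).contains x) (a.2 : List String)).length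
  rw [← List.countP_eq_length_filter]

lemma pv_mem_hits (L : List (String × PySem.Set String)) (a : String × PySem.Set String) (b : String) :
    b ∈ pvHits L a ↔ b ≠ a.1 ∧ ∃ p ∈ L, p.1 = b ∧ ∃ kw ∈ (a.2 : List String), kw ∈ (p.2 : List String) := by
  simp only [pvHits, List.mem_flatMap, List.mem_filter, pv_post_getD, List.mem_map,
    decide_eq_true_eq, beq_iff_eq]
  constructor
  · rintro ⟨kw, hkw, ⟨⟨q, ⟨⟨p, hpL, k', hk', rfl⟩, heq⟩, rfl⟩, hne⟩⟩
    exact ⟨hne, p, hpL, rfl, k', by simpa [← heq] using hkw, hk'⟩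
  · rintro ⟨hne, p, hpL, rfl, kw, hkwa, hkwp⟩
    exact ⟨kw, hkwa, ⟨⟨(kw, p.1), ⟨⟨p, hpL, kw, hkwp, rfl⟩, rfl⟩, rfl⟩, hne⟩⟩

lemma pv_ov_pos_iff (a p : String × PySem.Set String) :
    0 < pvOv a p ↔ ∃ kw ∈ a.2, kw ∈ p.2 := by
  unfold pvOv
  simp only [PySem.Set.len, PySem.Set.inter]
  rw [Int.natCast_pos, List.length_pos_iff_exists_mem]
  constructor
  · rintro ⟨kw, hkw⟩
    rw [List.mem_filter] at hkw
    exact ⟨kw, hkw.1, by simpa using hkw.2⟩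
  · rintro ⟨kw, h1, h2⟩
    exact ⟨kw, List.mem_filter.mpr ⟨h1, by simpa using h2⟩⟩

lemma pv_cnt_perm_scores (L : List (String × PySem.Set String)) (hk : (L.map (fun r => r.1)).Nodup)
    (hs : ∀ p ∈ L, (p.2 : List String).Nodup) (a : String × PySem.Set String) (_ha : a ∈ L) :
    ((PySem.Dict.counter (pvHits L a)).items).Perm (pvScores L a) := by
  rw [PySem.Dict.items_counter, pv_scores_eq]
  -- both lists have no duplicates
  have hnd1 : ((PySem.Set.ofList (pvHits L a)).map (fun k => (k, ((pvHits L a).count k : Int)))).Nodup := by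
    apply List.Nodup.map _ (PySem.Set.nodup_ofList _)
    intro x y hxy
    simpa using congrArg Prod.fst hxy
  have hLnd : L.Nodup := List.Nodup.of_map _ hk
  have hnd2 : ((L.filter (fun b => !(a.1 == b.1) && decide (0 < pvOv a b))).map (fun b => (b.1, pvOv a b))).Nodup := by
    apply List.Nodup.map_on
    · intro x hx y hy hxy
      exact pv_key_inj hk (List.mem_of_mem_filter hx) (List.mem_of_mem_filter hy) (by simpa using congrArg Prod.fst hxy)
    · exact List.Nodup.filter _ hLnd
  rw [List.perm_ext_iff_of_nodup hnd1 hnd2]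
  intro x
  simp only [List.mem_map, List.mem_filter, PySem.Set.mem_ofList, Bool.and_eq_true,
    Bool.not_eq_true', beq_eq_false_iff_ne, decide_eq_true_eq]
  constructor
  · rintro ⟨k, hkmem, rfl⟩
    rcases (pv_mem_hits L a k).mp hkmem with ⟨hne, p, hpL, rfl, hov⟩
    refine ⟨p, ⟨hpL, fun h => hne h.symm, (pv_ov_pos_iff a p).mpr hov⟩, ?_⟩
    rw [pv_count_hits L hk a p hpL (hs p hpL) hne]
    rfl
  · rintro ⟨p, ⟨hpL, hne, hov⟩, rfl⟩
    have hne' : p.1 ≠ a.1 := fun h => hne h.symm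
    have hmem : p.1 ∈ pvHits L a :=
      (pv_mem_hits L a p.1).mpr ⟨hne', p, hpL, rfl, (pv_ov_pos_iff a p).mp hov⟩
    refine ⟨p.1, hmem, ?_⟩
    rw [pv_count_hits L hk a p hpL (hs p hpL) hne']
    rfl

-- position dictionary facts
lemma pv_pos_items (L : List (String × PySem.Set String)) (hk : (L.map (fun r => r.1)).Nodup) :
    (pvPos L).items = (PySem.List.enumerate (L.map (fun p => p.1)) 0).map (fun p => (p.2, p.1)) := by
  unfold pvPos
  have h := PySem.Dict.items_foldl_insert_fresh (PySem.List.enumerate (L.map (fun p => p.1)) 0)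
    (fun p => p.2) (fun p => p.1) PySem.Dict.empty
    (by intro a _; simp [PySem.Dict.contains_empty])
    (by rw [PySem.List.map_snd_enumerate]; exact hk)
  rw [h]; simp [PySem.Dict.empty]

lemma pv_pos_getD (L : List (String × PySem.Set String)) (hk : (L.map (fun r => r.1)).Nodup)
    (i : Nat) (hi : i < (L.map (fun p => p.1)).length) :
    (pvPos L).getD (L.map (fun p => p.1))[i] 0 = (i : Int) := by
  have hkeys : (pvPos L).keys.Nodup := by
    show ((pvPos L).items.map (fun p => p.1)).Nodup
    rw [pv_pos_items L hk, List.map_map]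
    have : ((fun (p : String × Int) => p.1) ∘ (fun (p : Int × String) => (p.2, p.1))) = (fun (p : Int × String) => p.2) := rfl
    rw [this, PySem.List.map_snd_enumerate]
    exact hk
  apply PySem.Dict.getD_of_mem_items _ _ hkeys
  rw [pv_pos_items L hk]
  have hlen : i < (PySem.List.enumerate (L.map (fun p => p.1)) 0).length := by
    rwa [PySem.List.length_enumerate]
  have := PySem.List.getElem_enumerate (L.map (fun p => p.1)) 0 i hlen
  rw [List.mem_map]
  exact ⟨_, List.getElem_mem hlen, by rw [this]; simp⟩

lemma pv_pos_inj (L : List (String × PySem.Set String)) (hk : (L.map (fun r => r.1)).Nodup)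
    {k k' : String} (hmem : k ∈ L.map (fun p => p.1)) (hmem' : k' ∈ L.map (fun p => p.1))
    (h : (pvPos L).getD k 0 = (pvPos L).getD k' 0) : k = k' := by
  obtain ⟨i, hi, rfl⟩ := List.getElem_of_mem hmem
  obtain ⟨j, hj, rfl⟩ := List.getElem_of_mem hmem'
  rw [pv_pos_getD L hk i hi, pv_pos_getD L hk j hj] at h
  have : i = j := by exact_mod_cast h
  subst this; rfl

lemma pv_pairwise_pos (L : List (String × PySem.Set String)) (hk : (L.map (fun r => r.1)).Nodup) :
    L.Pairwise (fun p q => (pvPos L).getD p.1 0 < (pvPos L).getD q.1 0) := by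
  rw [List.pairwise_iff_getElem]
  intro i j hi hj hij
  have hi' : i < (L.map (fun p => p.1)).length := by simpa using hi
  have hj' : j < (L.map (fun p => p.1)).length := by simpa using hj
  have h1 : L[i].1 = (L.map (fun p => p.1))[i] := by simp
  have h2 : L[j].1 = (L.map (fun p => p.1))[j] := by simp
  rw [h1, h2, pv_pos_getD L hk i hi', pv_pos_getD L hk j hj']
  exact_mod_cast hij

-- generic: inserting into a pvR-sorted list keeps it sorted when the new element is comparable
lemma pv_insertBy_pairwise {α : Type} (R : α → α → Prop)
    (htrans : ∀ {x y z : α}, R x y → R y z → R x z)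
    (before : α → α → Bool) (x : α) (acc : List α)
    (hp : acc.Pairwise R) (hT : ∀ y ∈ acc, if before x y then R x y else R y x) :
    (PySem.List.insertBy before x acc).Pairwise R := by
  induction acc with
  | nil => simp [PySem.List.insertBy]
  | cons y ys ih =>
    have hy := hT y (by simp)
    have hyz := (List.pairwise_cons.mp hp).1
    have hys := (List.pairwise_cons.mp hp).2
    by_cases hb : before x y = true
    · rw [PySem.List.insertBy, if_pos hb]
      rw [if_pos hb] at hy
      refine List.Pairwise.cons ?_ hp
      intro z hz
      rcases List.mem_cons.mp hz with rfl | hz'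
      · exact hy
      · exact htrans hy (hyz z hz')
    · rw [PySem.List.insertBy, if_neg hb]
      rw [if_neg hb] at hy
      refine List.Pairwise.cons ?_ (ih hys (fun z hz => hT z (by simp [hz])))
      intro z hz
      rw [PySem.List.insertBy_mem_iff] at hz
      rcases hz with rfl | hz
      · exact hy
      · exact hyz z hz

lemma pv_foldl_insertBy_pairwise {α : Type} (R : α → α → Prop)
    (htrans : ∀ {x y z : α}, R x y → R y z → R x z)
    (before : α → α → Bool) (xs : List α)
    (hxs : xs.Pairwise (fun y x => if before x y then R x y else R y x)) :
    (xs.foldl (fun acc x => PySem.List.insertBy before x acc) []).Pairwise R := by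
  suffices h : ∀ (acc : List α), acc.Pairwise R →
      (∀ x' ∈ xs, ∀ y ∈ acc, if before x' y then R x' y else R y x') →
      (xs.foldl (fun acc x => PySem.List.insertBy before x acc) acc).Pairwise R from
    h [] (by simp) (by simp)
  induction xs with
  | nil => intro acc hp _; simpa using hp
  | cons x xs ih =>
    intro acc hp hcond
    have hxhead := (List.pairwise_cons.mp hxs).1
    simp only [List.foldl_cons]
    refine ih (List.pairwise_cons.mp hxs).2 (PySem.List.insertBy before x acc)
      (pv_insertBy_pairwise R htrans before x acc hp (fun y hy => hcond x (by simp) y hy)) ?_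
    intro x' hx' y hy
    rw [PySem.List.insertBy_mem_iff] at hy
    rcases hy with rfl | hy
    · exact hxhead x' hx'
    · exact hcond x' (by simp [hx']) y hy

lemma pvR_trans (posOf : String → Int) : ∀ {x y z : String × Int}, pvR posOf x y → pvR posOf y z → pvR posOf x z := by
  intro x y z h1 h2
  unfold pvR at *
  rcases h1 with h1 | ⟨h1, h1p⟩ <;> rcases h2 with h2 | ⟨h2, h2p⟩
  · exact Or.inl (lt_trans h2 h1)
  · exact Or.inl (h2 ▸ h1)
  · exact Or.inl (h1 ▸ h2)
  · exact Or.inr ⟨h1.trans h2, lt_trans h1p h2p⟩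

lemma pvR_antisymm (posOf : String → Int) (x y : String × Int) (h1 : pvR posOf x y) (h2 : pvR posOf y x) : x = y := by
  exfalso; unfold pvR at *; omega

lemma pv_sortedA_pairwise (posOf : String → Int) (s : List (String × Int))
    (hpos : s.Pairwise (fun x y => posOf x.1 < posOf y.1)) :
    (PySem.List.sorted s (fun x => x.2) true).Pairwise (pvR posOf) := by
  rw [PySem.List.sorted_rev_eq_foldl_insertBy]
  apply pv_foldl_insertBy_pairwise (pvR posOf) (fun h1 h2 => pvR_trans posOf h1 h2)
  refine hpos.imp ?_
  intro y x h
  by_cases hb : (decide (y.2 < x.2)) = true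
  · rw [if_pos hb]; exact Or.inl (by simpa using hb)
  · rw [if_neg hb]
    simp only [decide_eq_true_eq] at hb
    unfold pvR
    omega

lemma pv_sorted2_eq_foldl (xs : List (String × Int)) (k1 k2 : (String × Int) → Int) :
    PySem.List.sorted2 xs k1 k2 false =
      xs.foldl (fun acc x => PySem.List.insertBy
        (fun a b => decide (k1 a < k1 b) || (!decide (k1 b < k1 a) && decide (k2 a < k2 b))) x acc) [] := by
  simp [PySem.List.sorted2]

lemma pv_sortedB_pairwise (posOf : String → Int) (s : List (String × Int))
    (hpos : s.Pairwise (fun x y => posOf x.1 ≠ posOf y.1)) :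
    (PySem.List.sorted2 s (fun it => -it.2) (fun it => posOf it.1) false).Pairwise (pvR posOf) := by
  rw [pv_sorted2_eq_foldl]
  apply pv_foldl_insertBy_pairwise (pvR posOf) (fun h1 h2 => pvR_trans posOf h1 h2)
  refine hpos.imp ?_
  intro y x h
  by_cases hb : (decide (-x.2 < -y.2) || (!decide (-y.2 < -x.2) && decide (posOf x.1 < posOf y.1))) = true
  · rw [if_pos hb]
    unfold pvR
    simp only [Bool.or_eq_true, Bool.and_eq_true, Bool.not_eq_true', decide_eq_true_eq, decide_eq_false_iff_not] at hb
    omega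
  · rw [if_neg hb]
    unfold pvR
    simp only [Bool.or_eq_true, Bool.and_eq_true, Bool.not_eq_true', decide_eq_true_eq, decide_eq_false_iff_not] at hb
    omega

-- the per-page equality: A's stable reverse sort of the ordered scan = B's one-shot lexicographic sort
lemma pv_main (L : List (String × PySem.Set String)) (hk : (L.map (fun r => r.1)).Nodup)
    (hs : ∀ p ∈ L, (p.2 : List String).Nodup) (a : String × PySem.Set String) (ha : a ∈ L) :
    PySem.List.sorted (pvScores L a) (fun x => x.2) true =
      PySem.List.sorted2 ((PySem.Dict.counter (pvHits L a)).items)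
        (fun it => -it.2) (fun it => (pvPos L).getD it.1 0) false := by
  set posOf : String → Int := fun k => (pvPos L).getD k 0 with hposOf
  have hperm : (PySem.List.sorted (pvScores L a) (fun x => x.2) true).Perm
      (PySem.List.sorted2 ((PySem.Dict.counter (pvHits L a)).items)
        (fun it => -it.2) (fun it => posOf it.1) false) :=
    (PySem.List.sorted_perm _ _ _).trans
      (((pv_cnt_perm_scores L hk hs a ha).symm).trans (PySem.List.sorted2_perm _ _ _ _).symm)
  -- A side is pvR-sorted
  have hpairA : (PySem.List.sorted (pvScores L a) (fun x => x.2) true).Pairwise (pvR posOf) := by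
    apply pv_sortedA_pairwise
    rw [pv_scores_eq]
    exact ((pv_pairwise_pos L hk).filter _).map _ (fun b c h => h)
  -- B side is pvR-sorted
  have hpairB : (PySem.List.sorted2 ((PySem.Dict.counter (pvHits L a)).items)
      (fun it => -it.2) (fun it => posOf it.1) false).Pairwise (pvR posOf) := by
    apply pv_sortedB_pairwise
    rw [PySem.Dict.items_counter]
    refine List.Pairwise.map (R := fun k k' => posOf k ≠ posOf k') _
      (fun k k' h => h) ?_
    have hnd : (PySem.Set.ofList (pvHits L a)).Nodup := PySem.Set.nodup_ofList _
    have hmemorder : ∀ k ∈ PySem.Set.ofList (pvHits L a), k ∈ L.map (fun p => p.1) := by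
      intro k hkm
      rcases (pv_mem_hits L a k).mp ((PySem.Set.mem_ofList _ _).mp hkm) with ⟨_, p, hpL, rfl, _⟩
      exact List.mem_map.mpr ⟨p, hpL, rfl⟩
    refine List.Pairwise.imp_of_mem ?_ hnd
    intro k k' hkm hkm' hne heq
    exact hne (pv_pos_inj L hk (hmemorder k hkm) (hmemorder k' hkm') heq)
  exact List.Perm.eq_of_pairwise (fun x y _ _ h1 h2 => pvR_antisymm posOf x y h1 h2) hpairA hpairB hperm


lemma pv_idx_keys_nodup (pages : List (String × List String)) :
    ((pvIdx pages).map (fun r => r.1)).Nodup := by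
  unfold pvIdx
  rw [List.map_map]
  exact PySem.Dict.nodup_keys_ofList pages

lemma pv_A_eq (pages : List (String × List String)) (top_k : Int) :
    suggest_internal_links pages top_k =
      (pvIdx pages).map (fun a => (a.1, PySem.List.slice
        (PySem.List.sorted (pvScores (pvIdx pages) a) (fun x => x.2) true) none (some top_k))) := by
  simp only [suggest_internal_links]
  have h1 : (List.foldl (fun (d : PySem.Dict String (PySem.Set String)) p => d.insert p.1
        (PySem.Set.ofList ((p.2.filter (fun kw => kw ≠ "")).map (fun kw => PySem.Str.strip (PySem.Str.lower kw)))))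
        PySem.Dict.empty (PySem.Dict.ofList pages).items).items = pvIdx pages := by
    rw [PySem.Dict.items_foldl_insert_fresh ((PySem.Dict.ofList pages).items) (fun p => p.1)
      (fun p => PySem.Set.ofList ((p.2.filter (fun kw => kw ≠ "")).map (fun kw => PySem.Str.strip (PySem.Str.lower kw))))
      PySem.Dict.empty (by intro a _; simp [PySem.Dict.contains_empty])
      (PySem.Dict.nodup_keys_ofList pages)]
    simp [PySem.Dict.empty, pvIdx, pvKwset]
  rw [h1]
  rw [PySem.Dict.items_foldl_insert_fresh (pvIdx pages) (fun a => a.1)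
    (fun a => PySem.List.slice (PySem.List.sorted
      ((pvIdx pages).foldl (fun scores b =>
        if a.1 == b.1 then scores
        else if PySem.Set.len (PySem.Set.inter a.2 b.2) > 0 then scores ++ [(b.1, PySem.Set.len (PySem.Set.inter a.2 b.2))] else scores) [])
      (fun (x : String × Int) => x.2) true) none (some top_k))
    PySem.Dict.empty (by intro a _; simp [PySem.Dict.contains_empty]) (pv_idx_keys_nodup pages)]
  simp [PySem.Dict.empty, pvScores]

lemma pv_B_eq (pages : List (String × List String)) (top_k : Int) :
    suggest_internal_links_alt pages top_k =
      (pvIdx pages).map (fun a => (a.1, PySem.List.slice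
        (PySem.List.sorted2 ((PySem.Dict.counter (pvHits (pvIdx pages) a)).items)
          (fun it => -it.2) (fun it => (pvPos (pvIdx pages)).getD it.1 0) false) none (some top_k))) := by
  simp only [suggest_internal_links_alt]
  have hidx : (PySem.Dict.ofList pages).items.map
      (fun p => (p.1, PySem.Set.ofList ((p.2.filter (fun kw => kw ≠ "")).map (fun kw => PySem.Str.strip (PySem.Str.lower kw)))))
      = pvIdx pages := rfl
  rw [hidx]
  rw [PySem.Dict.items_foldl_insert_fresh (pvIdx pages) (fun a => a.1)
    (fun a => PySem.List.slice (PySem.List.sorted2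
      ((PySem.Dict.counter (a.2.flatMap (fun kw =>
        (((pvIdx pages).foldl (fun d p => p.2.foldl (fun d kw => d.modify kw [] (fun l => l ++ [p.1])) d) PySem.Dict.empty).getD kw []).filter (fun b => b ≠ a.1)))).items)
      (fun (it : String × Int) => -it.2)
      (fun (it : String × Int) => (((PySem.List.enumerate ((pvIdx pages).map (fun p => p.1)) 0).foldl (fun d p => d.insert p.2 p.1) PySem.Dict.empty)).getD it.1 0)
      false) none (some top_k))
    PySem.Dict.empty (by intro a _; simp [PySem.Dict.contains_empty]) (pv_idx_keys_nodup pages)]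
  simp only [PySem.Dict.empty]
  show List.map _ _ = _
  apply List.map_congr_left
  intro a _
  rfl

-- ===== VERDICT (by name: the statement is the Claim_ definition above) =====
theorem suggest_internal_links_spec : Claim_equal_suggest_internal_links := by
  intro pages top_k _hdom
  unfold Spec_suggest_internal_links
  rw [pv_A_eq, pv_B_eq]
  apply List.map_congr_left
  intro a ha
  have := pv_main (pvIdx pages) (pv_idx_keys_nodup pages)
    (by intro p hp
        simp only [pvIdx, List.mem_map] at hp
        obtain ⟨q, _, rfl⟩ := hp
        exact PySem.Set.nodup_ofList _) a ha
  rw [this]
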